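-- pv_equiv track=rewrite | github.com/Abhi001vj/coding-interview-preparation | leetcode_discussion_google/Google Interview Questions Analysis and Solutions.PY | count_sequences_dp
-- ===== SOURCE A (Python) =====
-- def count_sequences_dp(target: int, max_digit: int = 2) -> int:
--     """
--     Time: O(n)
--     Space: O(n)
--     Returns count of sequences summing to target using digits 1 to max_digit
--     """
--     dp = [0] * (target + 1)
--     dp[0] = 1  # Base case
--
--     for i in range(1, target + 1):
--         for digit in range(1, max_digit + 1):
--             if i >= digit:
--                 dp[i] += dp[i - digit]
--
--     return dp[target]
-- ===== SOURCE B (Python) =====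
-- def count_sequences_dp(target: int, max_digit: int = 2) -> int:
--     # Sliding-window sum: dp[i] is the sum of the previous max_digit entries,
--     # maintained in O(1) per cell via dp[i] = 2*dp[i-1] - dp[i-1-max_digit].
--     m = max(max_digit, 0)
--     dp = [1]
--     window = 0
--     for i in range(1, target + 1):
--         window += dp[i - 1]
--         j = i - m - 1
--         if j >= 0:
--             window -= dp[j]
--         dp.append(window)
--     return dp[target]
-- ===== Notes on version B (the rewrite author's own statement) =====
-- stated objective: faster
-- what changed: Replaces the nested loop over digits by a sliding-window sum maintained in O(1) per cell (dp[i] = 2*dp[i-1] - dp[i-1-max_digit]), removing the inner digit scan.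
import Mathlib
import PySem

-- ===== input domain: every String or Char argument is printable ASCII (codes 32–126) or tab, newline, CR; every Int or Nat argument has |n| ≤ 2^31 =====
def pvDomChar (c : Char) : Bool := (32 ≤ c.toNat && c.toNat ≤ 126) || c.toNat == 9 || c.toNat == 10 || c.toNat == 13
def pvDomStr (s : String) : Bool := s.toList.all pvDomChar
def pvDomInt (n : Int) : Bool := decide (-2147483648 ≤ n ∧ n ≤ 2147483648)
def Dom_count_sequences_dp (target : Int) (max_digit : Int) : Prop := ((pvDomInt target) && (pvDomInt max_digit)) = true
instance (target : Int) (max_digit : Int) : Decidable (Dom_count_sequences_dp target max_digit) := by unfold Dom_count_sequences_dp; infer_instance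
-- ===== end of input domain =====

-- B replaces A's inner loop over digits by a sliding-window sum maintained in O(1) per cell.

-- ===== PORT A =====
def count_sequences_dp (target : Int) (max_digit : Int) : Int :=
  let dp0 := List.replicate (target + 1).toNat (0 : Int)
  let dp1 := PySem.List.pySetD dp0 0 1
  let dp2 := (PySem.List.pyRange 1 (target + 1) 1).foldl (fun dp i =>
      (PySem.List.pyRange 1 (max_digit + 1) 1).foldl (fun dp digit =>
        if i ≥ digit then
          PySem.List.pySetD dp i (PySem.List.pyGetD dp i 0 + PySem.List.pyGetD dp (i - digit) 0)
        else dp) dp) dp1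
  PySem.List.pyGetD dp2 target 0

-- ===== PORT B =====
def count_sequences_dp_alt (target : Int) (max_digit : Int) : Int :=
  let m := max max_digit 0
  let st := (PySem.List.pyRange 1 (target + 1) 1).foldl (fun (st : List Int × Int) i =>
      let w1 := st.2 + PySem.List.pyGetD st.1 (i - 1) 0
      let j := i - m - 1
      let w2 := if 0 ≤ j then w1 - PySem.List.pyGetD st.1 j 0 else w1
      (st.1 ++ [w2], w2)) (([1] : List Int), (0 : Int))
  PySem.List.pyGetD st.1 target 0

-- ===== PRECONDITION & SPEC =====
-- A raises IndexError (dp[0] = 1 on the empty list) whenever target < 0; Pre_ excludes exactly those.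
def Pre_count_sequences_dp (target : Int) (max_digit : Int) : Prop := 0 ≤ target
instance (target : Int) (max_digit : Int) : Decidable (Pre_count_sequences_dp target max_digit) := by unfold Pre_count_sequences_dp; infer_instance
def pvWitness_count_sequences_dp : Int × Int := (3, 2)

def Spec_count_sequences_dp (target : Int) (max_digit : Int) (out : Int) : Prop := out = count_sequences_dp_alt target max_digit
instance (target : Int) (max_digit : Int) (out : Int) : Decidable (Spec_count_sequences_dp target max_digit out) := by unfold Spec_count_sequences_dp; infer_instance

-- ===== CLAIM (what is proved, stated in full; the proofs are below) =====
def Claim_equal_count_sequences_dp : Prop := ∀ (target : Int) (max_digit : Int), Dom_count_sequences_dp target max_digit → Pre_count_sequences_dp target max_digit → Spec_count_sequences_dp target max_digit (count_sequences_dp target max_digit)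

-- ===== LEMMAS AND PROOFS =====

-- reference DP table: ref m n = [dp 0, …, dp n], dp i = sum of the previous min(i,m) entries
def pvRef (m : Nat) : Nat → List Int
  | 0 => [1]
  | n+1 => pvRef m n ++ [((pvRef m n).drop (n + 1 - m)).sum]

lemma pvRef_length (m n : Nat) : (pvRef m n).length = n + 1 := by
  induction n with
  | zero => rfl
  | succ n ih => simp [pvRef, ih]

-- partial sum accumulated by A's inner loop after digits 1..d
def pvS (dp : List Int) (i : Nat) : Nat → Int
  | 0 => 0
  | d+1 => pvS dp i d + (if d + 1 ≤ i then dp.getD (i - (d+1)) 0 else 0)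

lemma pvS_eq_drop_sum (dp : List Int) (i : Nat) (hi : i ≤ dp.length) (D : Nat) :
    pvS dp i D = ((dp.take i).drop (i - D)).sum := by
  induction D with
  | zero =>
    have : (dp.take i).drop i = [] := by
      apply List.drop_eq_nil_of_le; simp [hi]
    simp [pvS, this]
  | succ D ih =>
    by_cases h : D + 1 ≤ i
    · have hlt : i - (D+1) < (dp.take i).length := by
        simp [List.length_take, Nat.min_eq_left hi]; omega
      have hlt' : i - (D+1) < dp.length := by omega
      have h1 : i - (D+1) + 1 = i - D := by omega
      have hdrop : (dp.take i).drop (i - (D+1))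
          = dp[i - (D+1)]'hlt' :: (dp.take i).drop (i - D) := by
        rw [List.drop_eq_getElem_cons hlt, h1, List.getElem_take]
      have hgetD : dp.getD (i - (D+1)) 0 = dp[i - (D+1)]'hlt' := by
        simp [List.getD_eq_getElem?_getD, List.getElem?_eq_getElem hlt']
      simp only [pvS, ih, if_pos h, hdrop, List.sum_cons, hgetD]
      ring
    · have : i - (D+1) = i - D := by omega
      simp [pvS, ih, h, this]

lemma inner_fold (D : Nat) (dp : List Int) (i : Nat) (hi : i < dp.length) :
    (PySem.List.pyRange 1 ((D:Int)+1) 1).foldl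
      (fun dp digit => if (i:Int) ≥ digit then
          PySem.List.pySetD dp (i:Int) (PySem.List.pyGetD dp (i:Int) 0 + PySem.List.pyGetD dp ((i:Int)-digit) 0)
        else dp) dp
    = dp.set i (dp.getD i 0 + pvS dp i D) := by
  induction D with
  | zero =>
    have hr : PySem.List.pyRange 1 (((0:Nat):Int)+1) 1 = [] := by decide
    simp only [hr, List.foldl_nil, pvS, Int.add_zero, List.getD_eq_getElem?_getD,
      List.getElem?_eq_getElem hi, Option.getD_some, List.set_getElem_self]
  | succ D ih =>
    have hc : (((D+1:Nat)):Int)+1 = ((D:Int)+1)+1 := by push_cast; ring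
    rw [hc, PySem.List.pyRange_one_succ_right (by omega), List.foldl_append, ih]
    simp only [List.foldl_cons, List.foldl_nil]
    by_cases h : D + 1 ≤ i
    · rw [if_pos (by exact_mod_cast h : ((i:Nat):Int) ≥ (D:Int)+1)]
      have hcast : (i:Int) - ((D:Int)+1) = ((i - (D+1) : Nat) : Int) := by omega
      have hne : i - (D+1) ≠ i := by omega
      simp only [hcast, PySem.List.pySetD_natCast, PySem.List.pyGetD_natCast]
      rw [List.set_set]
      have h1 : (dp.set i (dp.getD i 0 + pvS dp i D)).getD i 0
          = dp.getD i 0 + pvS dp i D := by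
        simp [List.getD_eq_getElem?_getD, List.getElem?_set_self, hi]
      have h2 : (dp.set i (dp.getD i 0 + pvS dp i D)).getD (i - (D+1)) 0
          = dp.getD (i - (D+1)) 0 := by
        simp [List.getD_eq_getElem?_getD, List.getElem?_set_ne (by omega : i ≠ i - (D+1)),
        hi]
      rw [h1, h2]
      have : pvS dp i (D+1) = pvS dp i D + dp.getD (i - (D+1)) 0 := by
        simp [pvS, h]
      rw [this]; ring_nf
    · rw [if_neg (by exact_mod_cast h : ¬ ((i:Nat):Int) ≥ (D:Int)+1)]
      have : pvS dp i (D+1) = pvS dp i D := by simp [pvS, h]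
      rw [this]

-- the telescoped window value equals the next reference entry
lemma window_step (m k : Nat) :
    ((pvRef m k).drop (k + 1 - m)).sum =
      (if k = 0 then 0 else (pvRef m k).getD k 0) + (pvRef m k).getD k 0
      - (if m ≤ k then (pvRef m k).getD (k - m) 0 else 0) := by
  cases k with
  | zero =>
    cases m with
    | zero => simp [pvRef]
    | succ m' => simp [pvRef]
  | succ k' =>
    have hlen : (pvRef m k').length = k' + 1 := pvRef_length m k'
    have hx : pvRef m (k'+1) = pvRef m k' ++ [((pvRef m k').drop (k'+1-m)).sum] := rfl
    have hgk : (pvRef m (k'+1)).getD (k'+1) 0 = ((pvRef m k').drop (k'+1-m)).sum := by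
      rw [hx, ← hlen]
      simp [List.getD_eq_getElem?_getD, List.getElem?_append_right (Nat.le_refl _)]
    rcases Nat.eq_zero_or_pos m with hm | hm
    · subst hm
      have hx0 : ((pvRef 0 k').drop (k'+1-0)).sum = 0 := by
        rw [List.drop_eq_nil_of_le (by omega)]; rfl
      have hd : (pvRef 0 (k'+1)).drop (k'+1+1-0) = [] :=
        List.drop_eq_nil_of_le (by rw [hx]; simp [hlen])
      rw [if_neg (Nat.succ_ne_zero k'), if_pos (Nat.zero_le _), hd, Nat.sub_zero, hgk, hx0]
      simp
    · by_cases hmk : m ≤ k' + 1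
      · have hidx : k' + 1 - m < (pvRef m k').length := by omega
        have hdropA : (pvRef m (k'+1)).drop (k'+1+1-m)
            = (pvRef m k').drop (k'+1+1-m) ++ [((pvRef m k').drop (k'+1-m)).sum] := by
          rw [hx]; rw [List.drop_append_of_le_length (by rw [hlen]; omega)]
        have hcons : (pvRef m k').drop (k'+1-m)
            = (pvRef m k')[k'+1-m]'hidx :: (pvRef m k').drop (k'+1+1-m) := by
          have h1 : k'+1-m+1 = k'+1+1-m := by omega
          rw [List.drop_eq_getElem_cons hidx, h1]
        have hgd : (pvRef m (k'+1)).getD (k'+1-m) 0 = (pvRef m k')[k'+1-m]'hidx := by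
          rw [hx]
          simp [List.getD_eq_getElem?_getD, List.getElem?_append_left hidx,
            List.getElem?_eq_getElem hidx]
        rw [if_neg (Nat.succ_ne_zero k'), if_pos hmk, hgk, hgd, hdropA, List.sum_append]
        have hsum : (List.drop (k'+1-m) (pvRef m k')).sum
            = (pvRef m k')[k'+1-m]'hidx + (List.drop (k'+1+1-m) (pvRef m k')).sum := by
          rw [hcons, List.sum_cons]
        simp only [List.sum_cons, List.sum_nil]
        omega
      · have e1 : k' + 1 + 1 - m = 0 := by omega
        have e2 : k' + 1 - m = 0 := by omega
        rw [if_neg hmk, if_neg (Nat.succ_ne_zero k'), hgk, e1, List.drop_zero, hx, e2,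
          List.drop_zero, List.sum_append]
        simp only [List.sum_cons, List.sum_nil]
        omega

lemma A_fold (M t k : Nat) (hk : k ≤ t) :
    (PySem.List.pyRange 1 ((k:Int)+1) 1).foldl (fun dp i =>
      (PySem.List.pyRange 1 ((M:Int) + 1) 1).foldl (fun dp digit =>
        if i ≥ digit then
          PySem.List.pySetD dp i (PySem.List.pyGetD dp i 0 + PySem.List.pyGetD dp (i - digit) 0)
        else dp) dp) ((1 : Int) :: List.replicate t 0)
    = pvRef M k ++ List.replicate (t - k) 0 := by
  induction k with
  | zero =>
    have hr : PySem.List.pyRange 1 (((0:Nat):Int)+1) 1 = [] := by decide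
    simp [hr, pvRef]
  | succ k ih =>
    have hcast : (((k+1:Nat)):Int)+1 = ((k:Int)+1)+1 := by push_cast; ring
    rw [hcast, PySem.List.pyRange_one_succ_right (show (1:Int) ≤ (k:Int)+1 by omega),
      List.foldl_append, ih (by omega)]
    simp only [List.foldl_cons, List.foldl_nil]
    have hi2 : ((k:Int)+1) = (((k+1:Nat)):Int) := by push_cast; ring
    rw [hi2]
    have hlenP : (pvRef M k).length = k + 1 := pvRef_length M k
    have hlen : k + 1 < (pvRef M k ++ List.replicate (t - k) 0).length := by
      simp [hlenP]; omega
    rw [inner_fold M _ (k+1) hlen]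
    have hrep : List.replicate (t - k) (0:Int) = 0 :: List.replicate (t - (k+1)) 0 := by
      rw [show t - k = (t - (k+1)) + 1 from by omega, List.replicate_succ]
    have hgd0 : (pvRef M k ++ List.replicate (t - k) (0:Int)).getD (k+1) 0 = 0 := by
      rw [hrep, ← hlenP]
      simp [List.getD_eq_getElem?_getD, List.getElem?_append_right (Nat.le_refl _)]
    have htake : (pvRef M k ++ List.replicate (t - k) (0:Int)).take (k+1) = pvRef M k :=
      List.take_left' hlenP
    rw [pvS_eq_drop_sum _ _ (by omega) M, htake, hgd0, hrep]
    have hset : ∀ v : Int, (pvRef M k ++ 0 :: List.replicate (t - (k+1)) (0:Int)).set (k+1) v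
        = pvRef M k ++ v :: List.replicate (t - (k+1)) 0 := by
      intro v; rw [← hlenP]; simp
    rw [hset]
    rw [show pvRef M (k+1) = pvRef M k ++ [((pvRef M k).drop (k + 1 - M)).sum] from rfl]
    simp

lemma pvRef_getD_succ (m k : Nat) :
    (pvRef m (k+1)).getD (k+1) 0 = ((pvRef m k).drop (k+1-m)).sum := by
  rw [show pvRef m (k+1) = pvRef m k ++ [((pvRef m k).drop (k+1-m)).sum] from rfl,
    ← pvRef_length m k]
  simp [List.getD_eq_getElem?_getD, List.getElem?_append_right (Nat.le_refl _)]

lemma B_fold (M k : Nat) :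
    (PySem.List.pyRange 1 ((k:Int)+1) 1).foldl (fun (st : List Int × Int) i =>
      let w1 := st.2 + PySem.List.pyGetD st.1 (i - 1) 0
      let j := i - (M:Int) - 1
      let w2 := if 0 ≤ j then w1 - PySem.List.pyGetD st.1 j 0 else w1
      (st.1 ++ [w2], w2)) (([1] : List Int), (0 : Int))
    = (pvRef M k, if k = 0 then 0 else (pvRef M k).getD k 0) := by
  induction k with
  | zero =>
    have hr : PySem.List.pyRange 1 (((0:Nat):Int)+1) 1 = [] := by decide
    simp [hr, pvRef]
  | succ k ih =>
    have hcast : (((k+1:Nat)):Int)+1 = ((k:Int)+1)+1 := by push_cast; ring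
    rw [hcast, PySem.List.pyRange_one_succ_right (show (1:Int) ≤ (k:Int)+1 by omega),
      List.foldl_append, ih]
    simp only [List.foldl_cons, List.foldl_nil]
    have e1 : ((k:Int)+1) - 1 = ((k:Nat):Int) := by ring
    rw [e1, PySem.List.pyGetD_natCast]
    have hx := window_step M k
    by_cases hMk : M ≤ k
    · have hj : (0:Int) ≤ (k:Int)+1 - (M:Int) - 1 := by omega
      rw [if_pos hj]
      have e2 : ((k:Int)+1) - (M:Int) - 1 = (((k-M:Nat)):Int) := by omega
      rw [e2, PySem.List.pyGetD_natCast]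
      rw [if_pos hMk] at hx
      rw [show (if k = 0 then 0 else (pvRef M k).getD k 0) + (pvRef M k).getD k 0
            - (pvRef M k).getD (k-M) 0 = ((pvRef M k).drop (k+1-M)).sum from hx.symm]
      rw [if_neg (Nat.succ_ne_zero k), pvRef_getD_succ]
      rfl
    · have hj : ¬ (0:Int) ≤ (k:Int)+1 - (M:Int) - 1 := by omega
      rw [if_neg hj]
      rw [if_neg hMk] at hx
      rw [show (if k = 0 then 0 else (pvRef M k).getD k 0) + (pvRef M k).getD k 0
            = ((pvRef M k).drop (k+1-M)).sum from by omega]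
      rw [if_neg (Nat.succ_ne_zero k), pvRef_getD_succ]
      rfl

-- ===== VERDICT (by name: the statement is the Claim_ definition above) =====
theorem count_sequences_dp_spec : Claim_equal_count_sequences_dp := by
  intro target max_digit _ hpre
  have hp : (0:Int) ≤ target := hpre
  unfold Spec_count_sequences_dp
  simp only [count_sequences_dp, count_sequences_dp_alt]
  have h0m : (0:Int) ≤ max max_digit 0 := le_max_right _ _
  set t := target.toNat with ht
  set M := (max max_digit 0).toNat with hM
  have htarget : target = (t:Int) := by omega
  have hmax : max max_digit 0 = (M:Int) := by omega
  have hrange : PySem.List.pyRange 1 (max_digit + 1) 1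
      = PySem.List.pyRange 1 ((M:Int) + 1) 1 := by
    by_cases h : max_digit ≤ 0
    · have hm0 : max max_digit 0 = 0 := max_eq_right h
      rw [PySem.List.pyRange_one_eq_nil (by omega),
        PySem.List.pyRange_one_eq_nil (by omega)]
    · have hme : (M:Int) = max_digit := by
        have h2 : max max_digit 0 = max_digit := max_eq_left (by omega)
        omega
      rw [hme]
  rw [htarget, hmax, hrange]
  have hdp1 : PySem.List.pySetD (List.replicate ((t:Int) + 1).toNat (0:Int)) 0 1
      = (1:Int) :: List.replicate t 0 := by
    have e : ((t:Int)+1).toNat = t + 1 := by omega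
    rw [e, List.replicate_succ]
    simp [PySem.List.pySetD, PySem.List.pySet?, PySem.List.pyIdx?]
  rw [hdp1, A_fold M t t (le_refl t), B_fold M t]
  simp [Nat.sub_self]
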